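-- pv_equiv track=rewrite | github.com/yusenthebot/alphaedge | src/pipeline/run.py | resolve_tickers
-- ===== SOURCE A (Python) =====
-- SHORTCUTS = {
--     'mag7': ['AAPL', 'MSFT', 'GOOGL', 'AMZN', 'META', 'NVDA', 'TSLA'],
--     'ai': ['NVDA', 'AMD', 'MSFT', 'GOOGL', 'META', 'PLTR'],
--     'chip': ['NVDA', 'AMD', 'INTC', 'TSM', 'AVGO', 'QCOM'],
--     'cn': ['BABA', 'JD', 'PDD', 'NIO', 'XPEV', 'LI', 'BIDU'],
-- }
--
-- def resolve_tickers(args: list) -> list: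
--     """Resolve ticker arguments, expanding shortcuts.
--
--     Args:
--         args: List of ticker symbols or shortcut names
--
--     Returns:
--         Deduplicated list of ticker symbols
--     """
--     tickers = []
--     for arg in args:
--         if arg.lower() in SHORTCUTS:
--             tickers.extend(SHORTCUTS[arg.lower()])
--         else:
--             tickers.append(arg.upper())
--     # Deduplicate while preserving order
--     seen = set()
--     return [t for t in tickers if not (t in seen or seen.add(t))]
-- ===== SOURCE B (Python) =====
-- SHORTCUTS = {
--     'mag7': ['AAPL', 'MSFT', 'GOOGL', 'AMZN', 'META', 'NVDA', 'TSLA'],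
--     'ai': ['NVDA', 'AMD', 'MSFT', 'GOOGL', 'META', 'PLTR'],
--     'chip': ['NVDA', 'AMD', 'INTC', 'TSM', 'AVGO', 'QCOM'],
--     'cn': ['BABA', 'JD', 'PDD', 'NIO', 'XPEV', 'LI', 'BIDU'],
-- }
--
-- def resolve_tickers(args: list) -> list:
--     """Back-to-front merge: walk args in reverse, and for each one prepend its
--     (self-deduplicated) expansion to the result built so far, dropping from that
--     result whatever the expansion already contributes. No seen set."""
--     result = []
--     for arg in reversed(args):
--         key = arg.lower()
--         head = SHORTCUTS[key] if key in SHORTCUTS else [arg.upper()]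
--         first = []
--         for t in head:
--             if t not in first:
--                 first.append(t)
--         result = first + [t for t in result if t not in first]
--     return result
-- ===== Notes on version B (the rewrite author's own statement) =====
-- stated objective: alternative
-- what changed: Replaces A's forward build-full-list-then-seen-set-dedup with a back-to-front merge: walking args in reverse, each argument's (self-deduplicated) expansion is prepended to the result so far while filtering out of that result what the expansion already contributes, so no seen set exists at all.
import Mathlib
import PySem

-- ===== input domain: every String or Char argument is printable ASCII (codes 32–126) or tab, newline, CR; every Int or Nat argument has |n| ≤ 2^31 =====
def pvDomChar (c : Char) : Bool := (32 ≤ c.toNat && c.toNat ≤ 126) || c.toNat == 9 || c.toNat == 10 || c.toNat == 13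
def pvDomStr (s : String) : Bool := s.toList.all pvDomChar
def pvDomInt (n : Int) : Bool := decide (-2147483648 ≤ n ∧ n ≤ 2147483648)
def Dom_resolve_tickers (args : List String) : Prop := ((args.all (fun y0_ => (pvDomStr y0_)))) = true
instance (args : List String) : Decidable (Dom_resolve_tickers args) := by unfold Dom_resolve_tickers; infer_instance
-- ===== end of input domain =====

-- B walks args in reverse, prepending each argument's deduplicated expansion to the result
-- and filtering out its duplicates from it (no seen set); an alternative decomposition.

-- ===== PORT A =====
-- module-level constant SHORTCUTS (shared by both Pythons)
def pvSHORTCUTS : PySem.Dict String (List String) :=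
  PySem.Dict.ofList
    [("mag7", ["AAPL", "MSFT", "GOOGL", "AMZN", "META", "NVDA", "TSLA"]),
     ("ai",   ["NVDA", "AMD", "MSFT", "GOOGL", "META", "PLTR"]),
     ("chip", ["NVDA", "AMD", "INTC", "TSM", "AVGO", "QCOM"]),
     ("cn",   ["BABA", "JD", "PDD", "NIO", "XPEV", "LI", "BIDU"])]

def resolve_tickers (args : List String) : List String :=
  -- pass 1: build the expanded list
  let tickers : List String :=
    args.foldl (fun acc arg =>
      if pvSHORTCUTS.contains (PySem.Str.lower arg) then
        acc ++ pvSHORTCUTS.getD (PySem.Str.lower arg) []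
      else
        acc ++ [PySem.Str.upper arg]) []
  -- pass 2: dedup while preserving order via a seen set
  (tickers.foldl (fun (p : PySem.Set String × List String) t =>
      if PySem.Set.contains p.1 t then p else (PySem.Set.add p.1 t, p.2 ++ [t]))
    (PySem.Set.empty, [])).2

-- ===== PORT B =====
def resolve_tickers_alt (args : List String) : List String :=
  -- for arg in reversed(args): result = first + [t for t in result if t not in first]
  args.reverse.foldl (fun result arg =>
    let key := PySem.Str.lower arg
    let head := if pvSHORTCUTS.contains key then pvSHORTCUTS.getD key [] else [PySem.Str.upper arg]
    -- for t in head: if t not in first: first.append(t)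
    let first := head.foldl (fun (f : List String) t => if t ∈ f then f else f ++ [t]) []
    first ++ result.filter (fun t => !(first.contains t))) []

-- ===== PRECONDITION & SPEC =====
def Spec_resolve_tickers (args : List String) (out : List String) : Prop := out = resolve_tickers_alt args
instance (args : List String) (out : List String) : Decidable (Spec_resolve_tickers args out) := by unfold Spec_resolve_tickers; infer_instance

-- ===== CLAIM =====
def Claim_equal_resolve_tickers : Prop := ∀ (args : List String), Dom_resolve_tickers args → Spec_resolve_tickers args (resolve_tickers args)

-- ===== LEMMAS AND PROOFS =====

-- the per-argument expansion both programs perform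
def pvCands (arg : String) : List String :=
  if pvSHORTCUTS.contains (PySem.Str.lower arg) then
    pvSHORTCUTS.getD (PySem.Str.lower arg) []
  else [PySem.Str.upper arg]

-- order-preserving first-occurrence dedup with an explicit seen list
def ddL (seen : List String) : List String → List String
  | [] => []
  | x :: xs => if x ∈ seen then ddL seen xs else x :: ddL (seen ++ [x]) xs

theorem resolve_tickers_phase1 (args : List String) :
    args.foldl (fun acc arg =>
      if pvSHORTCUTS.contains (PySem.Str.lower arg) then
        acc ++ pvSHORTCUTS.getD (PySem.Str.lower arg) []
      else
        acc ++ [PySem.Str.upper arg]) [] = args.flatMap pvCands := by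
  have h : (fun (acc : List String) arg =>
      if pvSHORTCUTS.contains (PySem.Str.lower arg) then
        acc ++ pvSHORTCUTS.getD (PySem.Str.lower arg) []
      else
        acc ++ [PySem.Str.upper arg]) = fun acc arg => acc ++ pvCands arg := by
    funext acc arg
    unfold pvCands
    split <;> rfl
  rw [h, PySem.List.foldl_append_eq_flatMap, List.nil_append]

-- A's pass 2 is ddL (a PySem.Set String IS a List String; Set.contains is membership)
theorem foldlA_eq_ddL (xs : List String) : ∀ (s : PySem.Set String) (acc : List String),
    (xs.foldl (fun (p : PySem.Set String × List String) t =>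
        if PySem.Set.contains p.1 t then p else (PySem.Set.add p.1 t, p.2 ++ [t])) (s, acc)).2
      = acc ++ ddL s xs := by
  induction xs with
  | nil => intro s acc; simp [ddL]
  | cons x xs ih =>
    intro s acc
    simp only [List.foldl_cons]
    by_cases hx : x ∈ s
    · rw [if_pos (by simp [PySem.Set.contains, hx]), ih, ddL, if_pos hx]
    · rw [if_neg (by simp [PySem.Set.contains, hx]), ih]
      show acc ++ [x] ++ ddL (PySem.Set.add s x) xs = acc ++ ddL s (x :: xs)
      rw [ddL, if_neg hx]
      have : PySem.Set.add s x = s ++ [x] := by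
        simp [PySem.Set.add, PySem.Set.contains, hx]
      rw [this, List.append_assoc]
      rfl

-- B's inner loop is ddL on the list built so far
theorem foldlB_eq_ddL (xs : List String) : ∀ (f : List String),
    xs.foldl (fun (f : List String) t => if t ∈ f then f else f ++ [t]) f = f ++ ddL f xs := by
  induction xs with
  | nil => intro f; simp [ddL]
  | cons x xs ih =>
    intro f
    by_cases hx : x ∈ f
    · simp [ddL, hx, ih]
    · simp [ddL, hx, ih]

theorem ddL_append (xs : List String) : ∀ (l : List String) (ys : List String),
    ddL l (xs ++ ys) = ddL l xs ++ ddL (l ++ ddL l xs) ys := by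
  induction xs with
  | nil => intro l ys; simp [ddL]
  | cons x xs ih =>
    intro l ys
    by_cases hx : x ∈ l
    · simp [ddL, hx, ih]
    · simp only [List.cons_append, ddL, hx, ih]
      simp

-- ddL only looks at membership of the seen list
theorem ddL_congr (xs : List String) : ∀ (l l' : List String),
    (∀ t, t ∈ l ↔ t ∈ l') → ddL l xs = ddL l' xs := by
  induction xs with
  | nil => intro l l' _; rfl
  | cons x xs ih =>
    intro l l' h
    simp only [ddL]
    by_cases hx : x ∈ l
    · rw [if_pos hx, if_pos ((h x).mp hx), ih l l' h]
    · rw [if_neg hx, if_neg (fun c => hx ((h x).mpr c)),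
        ih (l ++ [x]) (l' ++ [x]) (by intro t; simp [h t])]

-- dedup under an enlarged seen list = filter the dedup
theorem ddL_filter (ys : List String) : ∀ (p q : List String),
    ddL (p ++ q) ys = (ddL q ys).filter (fun t => !(p.contains t)) := by
  induction ys with
  | nil => intro p q; rfl
  | cons y ys ih =>
    intro p q
    by_cases hq : y ∈ q
    · conv_lhs => rw [ddL]
      rw [if_pos (by simp [hq] : y ∈ p ++ q)]
      conv_rhs => rw [ddL]
      rw [if_pos hq, ih]
    · conv_rhs => rw [ddL]
      rw [if_neg hq, List.filter_cons]
      by_cases hp : y ∈ p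
      · have hc : (!(p.contains y)) = false := by simp [hp]
        rw [hc]
        conv_lhs => rw [ddL]
        rw [if_pos (by simp [hp] : y ∈ p ++ q)]
        simp only [Bool.false_eq_true, if_false]
        rw [← ih p (q ++ [y])]
        refine ddL_congr ys _ _ ?_
        intro t
        simp only [List.mem_append, List.mem_singleton]
        constructor
        · tauto
        · rintro (h | h | rfl)
          · exact Or.inl h
          · exact Or.inr h
          · exact Or.inl hp
      · have hc : (!(p.contains y)) = true := by simp [hp]
        rw [hc]
        conv_lhs => rw [ddL]
        rw [if_neg (by simp [hp, hq] : ¬ y ∈ p ++ q)]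
        simp only [if_true]
        rw [← ih p (q ++ [y]), List.append_assoc]

-- the seen list after ddL [] c has the same members as c
-- the body of B's reversed loop
def pvStep (arg : String) (result : List String) : List String :=
  let first := (pvCands arg).foldl (fun (f : List String) t => if t ∈ f then f else f ++ [t]) []
  first ++ result.filter (fun t => !(first.contains t))

theorem alt_eq_foldr (args : List String) : resolve_tickers_alt args = args.foldr pvStep [] := by
  show args.reverse.foldl _ [] = _
  rw [List.foldl_reverse]
  rfl

theorem resolve_eq (args : List String) : resolve_tickers args = resolve_tickers_alt args := by
  induction args with
  | nil => rfl
  | cons a rest ih =>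
    have hA : ∀ l, resolve_tickers l = ddL [] (l.flatMap pvCands) := by
      intro l
      show (_ : PySem.Set String × List String).2 = _
      rw [resolve_tickers_phase1 l]
      exact foldlA_eq_ddL _ PySem.Set.empty []
    rw [hA] at ih ⊢
    rw [alt_eq_foldr] at ih ⊢
    show ddL [] (pvCands a ++ rest.flatMap pvCands) = pvStep a (rest.foldr pvStep [])
    rw [ddL_append, ← ih]
    unfold pvStep
    rw [foldlB_eq_ddL]
    simp only [List.nil_append]
    congr 1
    conv_lhs => rw [← List.append_nil (ddL [] (pvCands a))]
    rw [ddL_filter]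

-- ===== VERDICT =====
theorem resolve_tickers_spec : Claim_equal_resolve_tickers := by
  intro args _
  exact resolve_eq args
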